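-- pv_equiv track=rewrite | github.com/gongc123/CFT-fixed-point-tensor- | method.py | simtup
-- ===== SOURCE A (Python) =====
-- def simtup(tup):                 # simplify a tuple by removing '0''s of the tup[0]
--     lis1=tup[0]                  # e.g. simtup(('30103','20002'))= ('313','202')
--     lis2=tup[1]
--     if lis1=='':
--         return tup
--     for i,ele in enumerate(lis1):
--         if ele=='0':
--             lis1=lis1[:i]+lis1[i+1:]
--             lis2=lis2[:i]+lis2[i+1:]
--             return simtup((lis1,lis2))
--     return tup
-- ===== SOURCE B (Python) =====
-- def simtup(tup):
--     lis1 = tup[0]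
--     lis2 = tup[1]
--     if lis1 == '' or '0' not in lis1:
--         return tup
--     out1 = ''.join(c for c in lis1 if c != '0')
--     out2 = ''.join(b for a, b in zip(lis1, lis2) if a != '0') + lis2[len(lis1):]
--     return (out1, out2)
-- ===== Notes on version B (the rewrite author's own statement) =====
-- stated objective: alternative
-- what changed: Replaces A's recursion that rebuilds both strings and restarts the scan after every single '0' deletion with one linear pass: filter '0' out of the first string and keep the zipped characters of the second, appending its untouched tail.
import Mathlib
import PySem

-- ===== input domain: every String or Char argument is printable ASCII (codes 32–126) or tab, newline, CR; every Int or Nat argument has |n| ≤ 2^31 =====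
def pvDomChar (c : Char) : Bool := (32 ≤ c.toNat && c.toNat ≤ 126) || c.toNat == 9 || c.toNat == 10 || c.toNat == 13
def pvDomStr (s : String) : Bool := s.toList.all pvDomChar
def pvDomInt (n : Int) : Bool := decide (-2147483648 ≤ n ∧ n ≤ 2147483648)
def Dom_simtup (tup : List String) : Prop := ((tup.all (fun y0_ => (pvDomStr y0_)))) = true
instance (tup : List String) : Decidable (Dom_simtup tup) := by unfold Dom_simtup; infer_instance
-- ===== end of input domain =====

-- B replaces A's restart-after-each-deletion recursion by a single zip/filter pass (objective: alternative).

-- ===== PORT A =====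
-- the 'for i,ele in enumerate(lis1): if ele=='0'' loop: index of the first '0'
def pvFindZero : List Char → Option Nat
  | [] => none
  | c :: t => if c = '0' then some 0 else (pvFindZero t).map (· + 1)

theorem pvFindZero_lt : ∀ {l : List Char} {i : Nat}, pvFindZero l = some i → i < l.length := by
  intro l
  induction l with
  | nil => intro i h; simp [pvFindZero] at h
  | cons c t ih =>
    intro i h
    simp only [pvFindZero] at h
    split at h
    · simp at h
      simp only [List.length_cons]
      omega
    · cases ht : pvFindZero t with
      | none => rw [ht] at h; simp at h
      | some j =>
        rw [ht] at h; simp at h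
        have := ih ht
        simp only [List.length_cons]
        omega

-- lis1[:i]+lis1[i+1:] on strings (slices are exact here: 0 ≤ i < len for lis1, and for
-- lis2 Python slicing clips just like take/drop)
def pvCut (l : List Char) (i : Nat) : List Char := l.take i ++ l.drop (i + 1)

theorem pvCut_length_lt {l : List Char} {i : Nat} (h : i < l.length) :
    (pvCut l i).length < l.length := by
  simp [pvCut]; omega

-- the recursive body of A, after tup[0]/tup[1] have been read
def pvSimtupCore (l1 l2 : List Char) (tup : List String) : List String :=
  if l1 = [] then tup
  else
    match h : pvFindZero l1 with
    | none => tup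
    | some i =>
      let l1' := pvCut l1 i
      let l2' := pvCut l2 i
      pvSimtupCore l1' l2' [String.mk l1', String.mk l2']
termination_by l1.length
decreasing_by exact pvCut_length_lt (pvFindZero_lt h)

def simtup (tup : List String) : List String :=
  match tup[0]?, tup[1]? with
  | some s1, some s2 => pvSimtupCore s1.toList s2.toList tup
  | _, _ => tup   -- unreachable under Pre_simtup (Python raises IndexError)

-- ===== PORT B =====
-- ''.join(b for a,b in zip(lis1,lis2) if a != '0')
def pvKeep2 : List Char → List Char → List Char
  | [], _ => []
  | _ :: _, [] => []
  | a :: t1, b :: t2 => if a = '0' then pvKeep2 t1 t2 else b :: pvKeep2 t1 t2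

def simtup_alt (tup : List String) : List String :=
  match tup with
  | s1 :: s2 :: _ =>
    if s1 = "" ∨ ¬ s1.toList.contains '0' then tup
    else
      let out1 := s1.toList.filter (fun c => c ≠ '0')
      let out2 := pvKeep2 s1.toList s2.toList ++ s2.toList.drop s1.toList.length
      [String.mk out1, String.mk out2]
  | _ => tup

-- ===== PRECONDITION & SPEC =====
-- Python A evaluates tup[0] and tup[1] unconditionally: with fewer than two elements it raises IndexError.
def Pre_simtup (tup : List String) : Prop := 2 ≤ tup.length
instance (tup : List String) : Decidable (Pre_simtup tup) := by unfold Pre_simtup; infer_instance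
def pvWitness_simtup : List String := ["30103", "20002"]

def Spec_simtup (tup : List String) (out : List String) : Prop := out = simtup_alt tup
instance (tup : List String) (out : List String) : Decidable (Spec_simtup tup out) := by unfold Spec_simtup; infer_instance

-- ===== CLAIM (what is proved, stated in full; the proofs are below) =====
def Claim_equal_simtup : Prop := ∀ (tup : List String), Dom_simtup tup → Pre_simtup tup → Spec_simtup tup (simtup tup)

-- ===== LEMMAS AND PROOFS =====

theorem pvFindZero_none : ∀ {l : List Char}, pvFindZero l = none → ∀ c ∈ l, c ≠ '0' := by
  intro l
  induction l with
  | nil => simp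
  | cons c t ih =>
    intro h
    simp only [pvFindZero] at h
    split at h
    · simp at h
    · next hc =>
      cases ht : pvFindZero t with
      | none =>
        intro x hx
        rw [List.mem_cons] at hx
        rcases hx with rfl | hx
        · exact hc
        · exact ih ht x hx
      | some j => rw [ht] at h; simp at h

theorem pvKeep2_nozero {l1 l2 : List Char} (h : ∀ c ∈ l1, c ≠ '0') :
    pvKeep2 l1 l2 ++ l2.drop l1.length = l2 := by
  induction l1 generalizing l2 with
  | nil => simp [pvKeep2]
  | cons a t ih =>
    cases l2 with
    | nil => simp [pvKeep2]
    | cons b t2 =>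
      have ha : a ≠ '0' := h a (by simp)
      simp only [pvKeep2, if_neg ha, List.length_cons, List.drop_succ_cons, List.cons_append]
      rw [ih (fun c hc => h c (by simp [hc]))]

theorem pvFilter_nozero {l : List Char} (h : ∀ c ∈ l, c ≠ '0') :
    l.filter (fun c => c ≠ '0') = l := by
  rw [List.filter_eq_self]; intro c hc; simpa using h c hc

-- removing the first '0' of l1 does not change l1's filter
theorem pvCut_filter : ∀ {l : List Char} {i : Nat}, pvFindZero l = some i →
    (pvCut l i).filter (fun c => c ≠ '0') = l.filter (fun c => c ≠ '0') := by
  intro l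
  induction l with
  | nil => intro i h; simp [pvFindZero] at h
  | cons c t ih =>
    intro i h
    simp only [pvFindZero] at h
    split at h
    · next hc =>
      simp at h; subst h hc
      simp [pvCut, List.filter]
    · next hc =>
      cases ht : pvFindZero t with
      | none => rw [ht] at h; simp at h
      | some j =>
        rw [ht] at h; simp at h; subst h
        simp only [pvCut, List.take_succ_cons, List.drop_succ_cons, List.cons_append]
        simp only [List.filter_cons]
        rw [show List.take j t ++ List.drop (j + 1) t = pvCut t j from rfl, ih ht]

theorem pvKeep2_nil : ∀ (l : List Char), pvKeep2 l [] = [] := by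
  intro l; cases l <;> rfl

-- removing l1's first '0' from both lists leaves B's out2 unchanged
theorem pvCut_tail : ∀ {l1 : List Char} {i : Nat}, pvFindZero l1 = some i →
    ∀ (l2 : List Char),
      pvKeep2 (pvCut l1 i) (pvCut l2 i) ++ (pvCut l2 i).drop (pvCut l1 i).length =
        pvKeep2 l1 l2 ++ l2.drop l1.length := by
  intro l1
  induction l1 with
  | nil => intro i h; simp [pvFindZero] at h
  | cons c t ih =>
    intro i h l2
    simp only [pvFindZero] at h
    split at h
    · next hc =>
      simp at h; subst h hc
      cases l2 with
      | nil => simp [pvCut, pvKeep2_nil]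
      | cons b t2 => simp [pvCut, pvKeep2]
    · next hc =>
      cases ht : pvFindZero t with
      | none => rw [ht] at h; simp at h
      | some j =>
        rw [ht] at h; simp at h; subst h
        cases l2 with
        | nil =>
          simp [pvCut, pvKeep2_nil]
        | cons b t2 =>
          simp only [pvCut, List.take_succ_cons, List.drop_succ_cons, List.cons_append]
          simp only [pvKeep2, if_neg hc, List.length_cons, List.drop_succ_cons,
            List.cons_append, List.cons.injEq, true_and]
          rw [show List.take j t ++ List.drop (j + 1) t = pvCut t j from rfl,
            show List.take j t2 ++ List.drop (j + 1) t2 = pvCut t2 j from rfl]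
          exact ih ht t2

theorem pvFindZero_none_iff {l : List Char} :
    pvFindZero l = none ↔ l.contains '0' = false := by
  induction l with
  | nil => simp [pvFindZero]
  | cons c t ih =>
    simp only [pvFindZero, List.contains_cons]
    by_cases hc : c = '0'
    · subst hc; simp
    · rw [if_neg hc, Option.map_eq_none_iff, ih]
      have hb : ('0' == c) = false := by
        simp only [beq_eq_false_iff_ne, ne_eq]
        exact fun h => hc h.symm
      simp [hb]

-- unfolding lemmas for pvSimtupCore
theorem pvSimtupCore_stop {l1 l2 : List Char} {tup : List String}
    (h : l1 = [] ∨ pvFindZero l1 = none) : pvSimtupCore l1 l2 tup = tup := by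
  by_cases h0 : l1 = []
  · rw [pvSimtupCore, if_pos h0]
  · rw [pvSimtupCore, if_neg h0]
    split
    · rfl
    · next j h' => rcases h with h | h; · exact absurd h h0
                   · rw [h'] at h; cases h

theorem pvSimtupCore_some {l1 l2 : List Char} {tup : List String} {i : Nat}
    (h0 : l1 ≠ []) (h : pvFindZero l1 = some i) :
    pvSimtupCore l1 l2 tup =
      pvSimtupCore (pvCut l1 i) (pvCut l2 i) [String.mk (pvCut l1 i), String.mk (pvCut l2 i)] := by
  rw [pvSimtupCore, if_neg h0]
  split
  · next h' => rw [h'] at h; cases h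
  · next j h' => rw [h'] at h; cases h; rfl

theorem pvSimtupCore_eq : ∀ (n : Nat) (l1 : List Char), l1.length ≤ n → ∀ (l2 : List Char) (tup : List String),
    pvSimtupCore l1 l2 tup =
      if l1 = [] ∨ pvFindZero l1 = none then tup
      else [String.mk (l1.filter (fun c => c ≠ '0')),
            String.mk (pvKeep2 l1 l2 ++ l2.drop l1.length)] := by
  intro n
  induction n with
  | zero =>
    intro l1 hl l2 tup
    have h0 : l1 = [] := by cases l1 <;> simp_all
    rw [pvSimtupCore_stop (Or.inl h0), if_pos (Or.inl h0)]
  | succ n ih =>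
    intro l1 hl l2 tup
    by_cases hstop : l1 = [] ∨ pvFindZero l1 = none
    · rw [pvSimtupCore_stop hstop, if_pos hstop]
    · rw [if_neg hstop]
      push_neg at hstop
      obtain ⟨h0, hz0⟩ := hstop
      cases hz : pvFindZero l1 with
      | none => exact absurd hz hz0
      | some i =>
        have hi := pvFindZero_lt hz
        have hlen : (pvCut l1 i).length ≤ n := by
          have := pvCut_length_lt (l := l1) hi; omega
        rw [pvSimtupCore_some h0 hz, ih (pvCut l1 i) hlen (pvCut l2 i) _]
        by_cases hz2 : pvCut l1 i = [] ∨ pvFindZero (pvCut l1 i) = none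
        · rw [if_pos hz2]
          have hnz : ∀ c ∈ pvCut l1 i, c ≠ '0' := by
            rcases hz2 with h | h
            · rw [h]; simp
            · exact pvFindZero_none h
          have e1 : l1.filter (fun c => c ≠ '0') = pvCut l1 i := by
            rw [← pvCut_filter hz, pvFilter_nozero hnz]
          have e2 : pvKeep2 l1 l2 ++ l2.drop l1.length = pvCut l2 i := by
            rw [← pvCut_tail hz l2, pvKeep2_nozero hnz]
          rw [e1, e2]
        · rw [if_neg hz2]
          rw [pvCut_filter hz, pvCut_tail hz]

-- ===== VERDICT (by name: the statement is the Claim_ definition above) =====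
theorem simtup_spec : Claim_equal_simtup := by
  intro tup _ hpre
  unfold Spec_simtup
  match tup with
  | [] => simp [Pre_simtup] at hpre
  | [_] => simp [Pre_simtup] at hpre
  | s1 :: s2 :: rest =>
    simp only [simtup, simtup_alt, List.getElem?_cons_zero, List.getElem?_cons_succ]
    rw [pvSimtupCore_eq s1.toList.length s1.toList le_rfl s2.toList (s1 :: s2 :: rest)]
    have hnil : s1.toList = [] ↔ s1 = "" := String.toList_eq_nil_iff
    by_cases hempty : s1 = ""
    · rw [if_pos (Or.inl (hnil.mpr hempty)), if_pos (Or.inl hempty)]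
    · by_cases hcont : s1.toList.contains '0' = false
      · rw [if_pos (Or.inr (pvFindZero_none_iff.mpr hcont)),
          if_pos (Or.inr (by rw [hcont]; simp))]
      · have h1 : ¬ (s1.toList = [] ∨ pvFindZero s1.toList = none) := by
          simp only [not_or]
          exact ⟨fun h => hempty (hnil.mp h), fun h => hcont (pvFindZero_none_iff.mp h)⟩
        have h2 : ¬ (s1 = "" ∨ ¬ s1.toList.contains '0' = true) := by
          simp only [not_or, not_not]
          exact ⟨hempty, by simpa using hcont⟩
        rw [if_neg h1, if_neg h2]
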